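-- pv_equiv track=rewrite | github.com/francosorbello/ia1-repo | busqueda local/genetico.py | generatePopulation
-- ===== SOURCE A (Python) =====
-- def generatePopulation(individuals):
--     population = {}
--     keys = population.keys()
--     for elem in individuals:
--         #calculo fitness
--         hInd = heuristic(elem)
--         #si la key no existe creo un nuevo elemento
--         if (keys.isdisjoint([hInd])):
--             population[hInd] = []
--
--         population[hInd].append(elem)
--
--     return population
--
-- def heuristic(board):
--     attacking = 0
--     for y in range(0,len(board)):
--         x = board[y]
--         for i in range(y+1,len(board)):
--             #me fijo si estan en la misma fila o si los catetos son iguales(para ver si estan en diagonal)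
--             if x==board[i] or ( abs(x-board[i]) == abs(y-i) ):
--                 attacking += 1
--     return attacking
-- ===== SOURCE B (Python) =====
-- def heuristic(board):
--     # conflicts of the first queen with the suffix after it (distance d = 1, 2, ...), peeling suffixes
--     def clash(q, rest):
--         return sum(1 for d, c in enumerate(rest, 1) if q == c or abs(q - c) == d)
--     total = 0
--     rest = board
--     while rest:
--         total += clash(rest[0], rest[1:])
--         rest = rest[1:]
--     return total
--
-- def generatePopulation(individuals):
--     tagged = [(heuristic(e), e) for e in individuals]
--     seen = list(dict.fromkeys(h for h, _ in tagged))
--     return {h: [e for k, e in tagged if k == h] for h in seen}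
-- ===== Notes on version B (the rewrite author's own statement) =====
-- stated objective: alternative
-- what changed: A buckets boards into a dict in one pass (membership test + append) with an index-based double loop heuristic; B tags every board with its heuristic once, dedups the tag list for the key order, and builds each group by filtering the tagged list, with the heuristic computed by peeling suffixes (first queen vs. the rest at distances 1,2,...) instead of index arithmetic.
import Mathlib
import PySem

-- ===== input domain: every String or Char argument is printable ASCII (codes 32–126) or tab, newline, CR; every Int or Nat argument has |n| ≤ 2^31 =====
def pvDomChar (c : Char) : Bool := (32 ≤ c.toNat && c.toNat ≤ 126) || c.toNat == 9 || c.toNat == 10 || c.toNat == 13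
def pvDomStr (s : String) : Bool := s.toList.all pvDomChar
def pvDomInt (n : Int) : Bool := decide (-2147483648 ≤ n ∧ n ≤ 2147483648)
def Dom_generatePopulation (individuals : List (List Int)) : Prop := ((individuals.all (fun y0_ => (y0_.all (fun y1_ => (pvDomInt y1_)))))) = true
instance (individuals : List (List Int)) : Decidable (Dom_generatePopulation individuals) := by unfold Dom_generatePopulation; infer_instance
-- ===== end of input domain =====

-- B groups by tagging each board with its heuristic once, dedup'ing the tags for key order and
-- filtering the tagged list per key, instead of A's single-pass dict bucketing; B's heuristic is
-- computed by peeling suffixes (first queen vs. the rest) instead of A's index-based double loop (objective: alternative).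

-- ===== PORT A =====
def heuristicA (board : List Int) : Int :=
  (PySem.List.pyRange 0 (board.length : Int) 1).foldl (fun attacking y =>
    let x := PySem.List.pyGetD board y 0
    (PySem.List.pyRange (y + 1) (board.length : Int) 1).foldl (fun att i =>
      if x = PySem.List.pyGetD board i 0 ∨
         ((x - PySem.List.pyGetD board i 0).natAbs : Int) = ((y - i).natAbs : Int)
      then att + 1 else att) attacking) 0

def generatePopulation (individuals : List (List Int)) : List (Int × List (List Int)) :=
  (individuals.foldl (fun population elem =>
      let hInd := heuristicA elem
      let population := if population.contains hInd then population
                        else population.insert hInd ([] : List (List Int))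
      population.modify hInd [] (fun l => l ++ [elem]))
    (PySem.Dict.empty : PySem.Dict Int (List (List Int)))).items

-- ===== PORT B =====
def clashB (q : Int) (rest : List Int) (d : Int) : Int :=
  match rest with
  | [] => 0
  | c :: rs => (if q = c ∨ ((q - c).natAbs : Int) = d then 1 else 0) + clashB q rs (d + 1)

def heuristicB (board : List Int) : Int :=
  match board with
  | [] => 0
  | q :: rest => clashB q rest 1 + heuristicB rest

def generatePopulation_alt (individuals : List (List Int)) : List (Int × List (List Int)) :=
  let tagged := individuals.map (fun e => (heuristicB e, e))
  let seen := PySem.List.dedup (tagged.map (fun p => p.1))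
  seen.map (fun h => (h, tagged.filterMap (fun p => if p.1 = h then some p.2 else none)))

-- ===== PRECONDITION & SPEC =====
def Spec_generatePopulation (individuals : List (List Int)) (out : List (Int × List (List Int))) : Prop := out = generatePopulation_alt individuals
instance (individuals : List (List Int)) (out : List (Int × List (List Int))) : Decidable (Spec_generatePopulation individuals out) := by unfold Spec_generatePopulation; infer_instance

-- ===== CLAIM (what is proved, stated in full; the proofs are below) =====
def Claim_equal_generatePopulation : Prop := ∀ (individuals : List (List Int)), Dom_generatePopulation individuals → Spec_generatePopulation individuals (generatePopulation individuals)

-- ===== LEMMAS AND PROOFS =====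

-- A's inner loop over indices s..len equals B's clash over the suffix, distance s - y.
theorem inner_eq (L : List Int) (x : Int) (y : Nat) :
    ∀ (t : List Int) (s : Nat) (acc : Int), y < s → L.drop s = t →
    (PySem.List.pyRange (s : Int) (L.length : Int) 1).foldl (fun att i =>
      if x = PySem.List.pyGetD L i 0 ∨
         ((x - PySem.List.pyGetD L i 0).natAbs : Int) = (((y : Int) - i).natAbs : Int)
      then att + 1 else att) acc = acc + clashB x t ((s : Int) - (y : Int)) := by
  intro t
  induction t with
  | nil =>
    intro s acc hys hdrop
    have hle : L.length ≤ s := by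
      by_contra h
      have := List.drop_eq_nil_iff.mp hdrop
      omega
    rw [PySem.List.pyRange_one_eq_nil (by exact_mod_cast hle)]
    simp [clashB]
  | cons c rs ih =>
    intro s acc hys hdrop
    have hs : s < L.length := by
      by_contra h
      rw [List.drop_eq_nil_of_le (by omega)] at hdrop
      simp at hdrop
    have hget : L[s] = c := by
      have h0 : (L.drop s)[0]'(by simp [hdrop]) = c := by simp [hdrop]
      rw [List.getElem_drop] at h0
      simpa using h0
    have hdrop' : L.drop (s + 1) = rs := by
      have := List.drop_drop (i := 1) (j := s) (l := L)
      rw [hdrop] at this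
      simpa [Nat.add_comm] using this.symm
    rw [PySem.List.pyRange_one_cons (by exact_mod_cast hs)]
    rw [List.foldl_cons]
    have hgd : PySem.List.pyGetD L (s : Int) 0 = c := by
      rw [PySem.List.pyGetD_natCast]
      simp [List.getD, hs, hget]
    have habs : (((y : Int) - (s : Int)).natAbs : Int) = (s : Int) - (y : Int) := by omega
    have ihs := ih (s + 1) (if x = c ∨ ((x - c).natAbs : Int) = (s : Int) - (y : Int) then acc + 1 else acc) (by omega) hdrop'
    simp only [Nat.cast_add, Nat.cast_one] at ihs
    rw [hgd, habs]
    rw [ihs]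
    have hstep : ((s : Int) + 1) - (y : Int) = ((s : Int) - (y : Int)) + 1 := by ring
    rw [hstep]
    simp only [clashB]
    split_ifs <;> ring

-- A's outer loop from index s equals B's heuristic of the suffix.
theorem outer_eq (L : List Int) :
    ∀ (t : List Int) (s : Nat) (acc : Int), L.drop s = t →
    (PySem.List.pyRange (s : Int) (L.length : Int) 1).foldl (fun attacking y =>
      (PySem.List.pyRange (y + 1) (L.length : Int) 1).foldl (fun att i =>
        if PySem.List.pyGetD L y 0 = PySem.List.pyGetD L i 0 ∨
           ((PySem.List.pyGetD L y 0 - PySem.List.pyGetD L i 0).natAbs : Int) = ((y - i).natAbs : Int)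
        then att + 1 else att) attacking) acc = acc + heuristicB t := by
  intro t
  induction t with
  | nil =>
    intro s acc hdrop
    have hle : L.length ≤ s := by
      by_contra h
      have := List.drop_eq_nil_iff.mp hdrop
      omega
    rw [PySem.List.pyRange_one_eq_nil (by exact_mod_cast hle)]
    simp [heuristicB]
  | cons q rs ih =>
    intro s acc hdrop
    have hs : s < L.length := by
      by_contra h
      rw [List.drop_eq_nil_of_le (by omega)] at hdrop
      simp at hdrop
    have hget : L[s] = q := by
      have h0 : (L.drop s)[0]'(by simp [hdrop]) = q := by simp [hdrop]
      rw [List.getElem_drop] at h0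
      simpa using h0
    have hdrop' : L.drop (s + 1) = rs := by
      have := List.drop_drop (i := 1) (j := s) (l := L)
      rw [hdrop] at this
      simpa [Nat.add_comm] using this.symm
    rw [PySem.List.pyRange_one_cons (by exact_mod_cast hs)]
    rw [List.foldl_cons]
    have hgd : PySem.List.pyGetD L (s : Int) 0 = q := by
      rw [PySem.List.pyGetD_natCast]
      simp [List.getD, hs, hget]
    simp only [hgd]
    have hinner := inner_eq L q s rs (s + 1) acc (by omega) hdrop'
    simp only [Nat.cast_add, Nat.cast_one] at hinner
    have h1 : ((s : Int) + 1) - (s : Int) = 1 := by ring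
    rw [h1] at hinner
    rw [hinner]
    have ihs := ih (s + 1) (acc + clashB q rs 1) hdrop'
    simp only [Nat.cast_add, Nat.cast_one] at ihs
    rw [ihs]
    simp [heuristicB]
    ring

theorem heur_eq (board : List Int) : heuristicA board = heuristicB board := by
  have := outer_eq board board 0 0 (by simp)
  simpa [heuristicA] using this

-- A's loop step on the dict.
def stepA (d : PySem.Dict Int (List (List Int))) (elem : List Int) : PySem.Dict Int (List (List Int)) :=
  let hInd := heuristicA elem
  let d := if d.contains hInd then d else d.insert hInd ([] : List (List Int))
  d.modify hInd [] (fun l => l ++ [elem])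

theorem generatePopulation_eq_foldl (individuals : List (List Int)) :
    generatePopulation individuals =
      (individuals.foldl stepA (PySem.Dict.empty : PySem.Dict Int (List (List Int)))).items := rfl

theorem keys_stepA (d : PySem.Dict Int (List (List Int))) (e : List Int) :
    (stepA d e).keys = PySem.Set.add d.keys (heuristicA e) := by
  unfold stepA
  by_cases h : d.contains (heuristicA e)
  · simp only [h, if_true]
    rw [PySem.Dict.keys_modify, PySem.Dict.keys_insert_of_contains _ _ h]
    have hm : heuristicA e ∈ d.keys := (PySem.Dict.contains_iff_mem_keys d _).mp h
    exact (PySem.Set.add_of_mem hm).symm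
  · have h' : d.contains (heuristicA e) = false := by simpa using h
    simp only [h', Bool.false_eq_true, if_false]
    rw [PySem.Dict.keys_modify,
        PySem.Dict.keys_insert_of_contains _ _ (PySem.Dict.contains_insert_self d _ _),
        PySem.Dict.keys_insert_of_not_contains _ _ h']
    have hm : heuristicA e ∉ d.keys := fun hm => h ((PySem.Dict.contains_iff_mem_keys d _).mpr hm)
    exact (PySem.Set.add_of_not_mem hm).symm

theorem keys_foldl_stepA (l : List (List Int)) :
    ∀ (d : PySem.Dict Int (List (List Int))),
      (l.foldl stepA d).keys = PySem.Set.update d.keys (l.map heuristicA) := by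
  induction l with
  | nil => intro d; simp [PySem.Set.update]
  | cons e rs ih =>
    intro d
    rw [List.foldl_cons, ih, List.map_cons, PySem.Set.update_cons, keys_stepA]

theorem getD_stepA (d : PySem.Dict Int (List (List Int))) (e : List Int) (k : Int) :
    (stepA d e).getD k [] = d.getD k [] ++ (if heuristicA e = k then [e] else []) := by
  unfold stepA
  by_cases h : d.contains (heuristicA e)
  · simp only [h, if_true]
    rw [PySem.Dict.getD_modify]
    by_cases hk : k = heuristicA e
    · subst hk; simp
    · have hne : ¬ heuristicA e = k := fun hh => hk hh.symm
      simp [hk, hne]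
  · have h' : d.contains (heuristicA e) = false := by simpa using h
    simp only [h', Bool.false_eq_true, if_false]
    rw [PySem.Dict.getD_modify]
    by_cases hk : k = heuristicA e
    · subst hk
      simp [PySem.Dict.getD_of_not_contains _ _ h']
    · rw [if_neg hk, PySem.Dict.getD_insert]
      have hne : ¬ heuristicA e = k := fun hh => hk hh.symm
      simp [hk, hne]

theorem getD_foldl_stepA (l : List (List Int)) :
    ∀ (d : PySem.Dict Int (List (List Int))) (k : Int),
      (l.foldl stepA d).getD k [] = d.getD k [] ++ l.filter (fun e => heuristicA e == k) := by
  induction l with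
  | nil => intro d k; simp
  | cons e rs ih =>
    intro d k
    rw [List.foldl_cons, ih, getD_stepA]
    by_cases h : heuristicA e = k <;> simp [h]

theorem nodup_keys_foldl_stepA (l : List (List Int)) :
    (l.foldl stepA (PySem.Dict.empty : PySem.Dict Int (List (List Int)))).keys.Nodup := by
  rw [keys_foldl_stepA]
  exact PySem.Set.nodup_update _ _ (by rw [PySem.Dict.keys_empty]; exact List.nodup_nil)

theorem filterMap_tagged (l : List (List Int)) (f : List Int → Int) (h : Int) :
    (l.map (fun e => (f e, e))).filterMap (fun p => if p.1 = h then some p.2 else none) =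
      l.filter (fun e => f e == h) := by
  induction l with
  | nil => rfl
  | cons e rs ih =>
    simp only [List.map_cons, List.filterMap_cons, List.filter_cons]
    by_cases he : f e = h <;> simp [he, ih]

-- ===== VERDICT (by name: the statement is the Claim_ definition above) =====
theorem generatePopulation_spec : Claim_equal_generatePopulation := by
  intro individuals _
  unfold Spec_generatePopulation
  rw [generatePopulation_eq_foldl]
  rw [PySem.Dict.items_eq_map_keys _ (nodup_keys_foldl_stepA individuals) []]
  unfold generatePopulation_alt
  simp only [List.map_map]
  have hmap : individuals.map ((fun p => p.1) ∘ fun e => (heuristicB e, e)) = individuals.map heuristicA := by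
    simp [Function.comp_def, fun e => (heur_eq e).symm]
  rw [hmap]
  rw [PySem.List.dedup_eq_ofList, ← PySem.Set.update_empty]
  have hk0 : (PySem.Set.empty.update (individuals.map heuristicA) : List Int) =
      (individuals.foldl stepA (PySem.Dict.empty : PySem.Dict Int (List (List Int)))).keys := by
    rw [keys_foldl_stepA, PySem.Dict.keys_empty]
    rfl
  rw [hk0]
  apply List.map_congr_left
  intro k _
  rw [getD_foldl_stepA, filterMap_tagged]
  simp only [PySem.Dict.getD_empty, List.nil_append]
  congr 1
  apply List.filter_congr
  intro e _
  simp [heur_eq]
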